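-- pv_equiv track=rewrite | github.com/GodishalaAshwith/CompCoding-Streak | CodeChef/1600-1800/1694.py | count_vowel_matrix_slices
-- ===== SOURCE A (Python) =====
-- MOD = 10 ** 9 + 7
--
-- def count_vowel_matrix_slices(N, K, S):
--     # Count the positions of vowels
--     vowel_positions = [i for i in range(N) if S[i] in 'aeiou']
--     total_vowels = len(vowel_positions)
--
--     # If the number of vowels is not divisible by K, return 0
--     if total_vowels % K != 0:
--         return 0
--
--     # Number of groups
--     groups = total_vowels // K
--
--     # Calculate the number of ways to place dividers
--     result = 1
--     for i in range(1, groups):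
--         # Number of positions between the (i*K)th vowel and the (i*K+1)th vowel
--         positions = vowel_positions[i * K] - vowel_positions[i * K - 1]
--         result = (result * positions) % MOD
--
--     return result
-- ===== SOURCE B (Python) =====
-- MOD = 10 ** 9 + 7
--
-- def count_vowel_matrix_slices(N, K, S):
--     # Single fused scan: no positions list; a running in-group counter and the
--     # index of the last group-completing vowel replace the index arithmetic.
--     result = 1
--     total = 0
--     c = 0
--     last = 0
--     pending = False
--     for i in range(N):
--         if S[i] in 'aeiou':
--             if pending:
--                 result = (result * (i - last)) % MOD
--             total += 1
--             c += 1
--             if c == K: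
--                 c = 0
--                 last = i
--                 pending = True
--             else:
--                 pending = False
--     if total % K != 0:
--         return 0
--     return result
-- ===== Notes on version B (the rewrite author's own statement) =====
-- stated objective: alternative
-- what changed: B replaces A's two-phase plan (materialize the list of vowel positions, then index into it at group boundaries i*K and i*K-1) by one fused scan keeping only a running vowel count, an in-group counter and the last group-completing index, multiplying gaps as group starts are met.
import Mathlib
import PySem

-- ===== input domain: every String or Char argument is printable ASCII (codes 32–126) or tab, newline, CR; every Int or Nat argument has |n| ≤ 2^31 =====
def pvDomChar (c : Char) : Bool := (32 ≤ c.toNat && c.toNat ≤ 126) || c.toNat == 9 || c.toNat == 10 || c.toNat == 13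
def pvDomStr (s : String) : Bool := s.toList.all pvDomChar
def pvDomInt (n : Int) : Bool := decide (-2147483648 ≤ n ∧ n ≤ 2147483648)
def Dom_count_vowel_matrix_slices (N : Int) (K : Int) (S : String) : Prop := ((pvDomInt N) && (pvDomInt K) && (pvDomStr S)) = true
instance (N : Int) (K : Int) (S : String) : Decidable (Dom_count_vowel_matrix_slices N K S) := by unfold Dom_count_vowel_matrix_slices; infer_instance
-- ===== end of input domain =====

-- B fuses A's two phases (vowel-position list, then indexed gap products) into one
-- scan with a running counter; proved equal on all inputs where A returns (Pre_).

def pvMOD : Int := 10 ^ 9 + 7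

-- shared helper: Python's `S[i] in 'aeiou'`; out-of-range (IndexError, excluded by Pre_) defaults to false
def pvIsVowelAt (S : String) (i : Int) : Bool :=
  match PySem.Str.pyGet? S i with
  | some c => c == 'a' || c == 'e' || c == 'i' || c == 'o' || c == 'u'
  | none => false

-- ===== PORT A =====
def count_vowel_matrix_slices (N : Int) (K : Int) (S : String) : Int :=
  let vowel_positions := (PySem.List.pyRange 0 N 1).filter (fun i => pvIsVowelAt S i)
  let total_vowels : Int := vowel_positions.length
  if PySem.Int.mod total_vowels K ≠ 0 then 0
  else
    let groups := PySem.Int.floordiv total_vowels K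
    (PySem.List.pyRange 1 groups 1).foldl
      (fun result i =>
        let positions := PySem.List.pyGetD vowel_positions (i * K) 0 -
                         PySem.List.pyGetD vowel_positions (i * K - 1) 0
        PySem.Int.mod (result * positions) pvMOD) 1

-- ===== PORT B =====
-- the loop body of Source B at a vowel index i, on state (result, total, c, last, pending)
def pvVowelStep (K : Int) (st : Int × Int × Int × Int × Bool) (i : Int) : Int × Int × Int × Int × Bool :=
  let (result, total, c, last, pending) := st
  let result := if pending then PySem.Int.mod (result * (i - last)) pvMOD else result
  let total := total + 1
  let c := c + 1
  if c == K then (result, total, 0, i, true) else (result, total, c, last, false)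

def count_vowel_matrix_slices_alt (N : Int) (K : Int) (S : String) : Int :=
  let st := (PySem.List.pyRange 0 N 1).foldl
    (fun st i => if pvIsVowelAt S i then pvVowelStep K st i else st)
    (1, 0, 0, 0, false)
  if PySem.Int.mod st.2.1 K ≠ 0 then 0 else st.1

-- ===== PRECONDITION & SPEC =====
-- Pre_ excludes exactly the raising inputs: K = 0 (ZeroDivisionError) and N > len(S) (IndexError).
def Pre_count_vowel_matrix_slices (N : Int) (K : Int) (S : String) : Prop :=
  K ≠ 0 ∧ N ≤ (S.toList.length : Int)
instance (N : Int) (K : Int) (S : String) : Decidable (Pre_count_vowel_matrix_slices N K S) := by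
  unfold Pre_count_vowel_matrix_slices; infer_instance

def pvWitness_count_vowel_matrix_slices : Int × Int × String := (4, 2, "aexi")

def Spec_count_vowel_matrix_slices (N : Int) (K : Int) (S : String) (out : Int) : Prop := out = count_vowel_matrix_slices_alt N K S
instance (N : Int) (K : Int) (S : String) (out : Int) : Decidable (Spec_count_vowel_matrix_slices N K S out) := by unfold Spec_count_vowel_matrix_slices; infer_instance

-- ===== CLAIM (what is proved, stated in full; the proofs are below) =====
def Claim_equal_count_vowel_matrix_slices : Prop := ∀ (N : Int) (K : Int) (S : String), Dom_count_vowel_matrix_slices N K S → Pre_count_vowel_matrix_slices N K S → Spec_count_vowel_matrix_slices N K S (count_vowel_matrix_slices N K S)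

-- ===== LEMMAS AND PROOFS =====

-- A's gap product over group boundaries 1..b-1, read off a positions list l (defeq to A's fold)
def pvAprod (K : Int) (l : List Int) (b : Int) : Int :=
  (PySem.List.pyRange 1 b 1).foldl
    (fun result i =>
      let positions := PySem.List.pyGetD l (i * K) 0 - PySem.List.pyGetD l (i * K - 1) 0
      PySem.Int.mod (result * positions) pvMOD) 1

lemma pvGetD_append_left (l : List Int) (x j d : Int) (h0 : 0 ≤ j) (h : j < (l.length : Int)) :
    PySem.List.pyGetD (l ++ [x]) j d = PySem.List.pyGetD l j d := by
  rw [PySem.List.pyGetD_eq_getElem (l ++ [x]) d h0 (by simp; omega),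
      PySem.List.pyGetD_eq_getElem l d h0 h]
  exact List.getElem_append_left (by omega)

lemma pvGetD_append_length (l : List Int) (x d : Int) :
    PySem.List.pyGetD (l ++ [x]) (l.length : Int) d = x := by
  rw [PySem.List.pyGetD_eq_getElem (l ++ [x]) d (by positivity) (by simp)]
  simp

lemma pvAprod_append (K : Int) (hK : 1 ≤ K) (l : List Int) (x : Int) (b : Int)
    (hb : (b - 1) * K ≤ (l.length : Int) - 1) :
    pvAprod K (l ++ [x]) b = pvAprod K l b := by
  unfold pvAprod
  refine PySem.List.foldl_congr_mem _ _ _ _ (fun acc i hi => ?_)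
  rw [PySem.List.mem_pyRange_one] at hi
  have h1 : i * K ≤ (l.length : Int) - 1 := by
    calc i * K ≤ (b - 1) * K := by nlinarith [hi.1, hi.2]
    _ ≤ (l.length : Int) - 1 := hb
  have h2 : 1 ≤ i * K := by nlinarith [hi.1]
  rw [pvGetD_append_left l x _ 0 (by omega) (by omega),
      pvGetD_append_left l x _ 0 (by omega) (by omega)]

-- appending the first vowel of a new group multiplies in the gap to the previous group's end
lemma pvAprod_mul (K : Int) (hK : 1 ≤ K) (l : List Int) (x : Int) (m : Int) (hm : 1 ≤ m)
    (hlen : (l.length : Int) = m * K) :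
    pvAprod K (l ++ [x]) (m + 1) =
      PySem.Int.mod (pvAprod K l m * (x - PySem.List.pyGetD l (m * K - 1) 0)) pvMOD := by
  have hmK : 1 ≤ m * K := by nlinarith
  conv_lhs => rw [pvAprod, PySem.List.pyRange_one_succ_right (by omega : (1:Int) ≤ m), List.foldl_append]
  have hpre : (PySem.List.pyRange 1 m).foldl
      (fun result i =>
        let positions := PySem.List.pyGetD (l ++ [x]) (i * K) 0 -
                         PySem.List.pyGetD (l ++ [x]) (i * K - 1) 0
        PySem.Int.mod (result * positions) pvMOD) 1 = pvAprod K l m := by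
    have := pvAprod_append K hK l x m (by nlinarith)
    unfold pvAprod at this ⊢
    exact this
  rw [hpre]
  simp only [List.foldl_cons, List.foldl_nil]
  rw [show m * K = (l.length : Int) from hlen.symm, pvGetD_append_length,
      pvGetD_append_left l x _ 0 (by omega) (by omega)]

-- the invariant of B's scan for K ≥ 1, with length = k*q + r, r < k
lemma pvFold_pos (K : Int) (k : Nat) (hKk : K = (k : Int)) (hk : 1 ≤ k) :
    ∀ (l : List Int) (q r : Nat), l.length = k * q + r → r < k →
    l.foldl (pvVowelStep K) (1, 0, 0, 0, false) =
      (pvAprod K l (if 1 ≤ r then (q : Int) + 1 else (q : Int)),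
       (l.length : Int),
       (r : Int),
       (if 1 ≤ q then PySem.List.pyGetD l ((q : Int) * K - 1) 0 else 0),
       decide (1 ≤ q ∧ r = 0)) := by
  have hK1 : 1 ≤ K := by omega
  intro l
  induction l using List.reverseRecOn with
  | nil =>
    intro q r hlen hr
    simp only [List.length_nil] at hlen
    obtain ⟨hkq, hr0⟩ : k * q = 0 ∧ r = 0 := by omega
    have hq0 : q = 0 := by rcases Nat.mul_eq_zero.mp hkq with h | h <;> omega
    subst hq0; subst hr0
    simp only [List.foldl_nil, List.length_nil, Nat.cast_zero]
    rw [pvAprod, PySem.List.pyRange_one_eq_nil (by norm_num)]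
    norm_num
  | append_singleton l x ih =>
    intro q r hlen hr
    rw [List.foldl_append]
    simp only [List.foldl_cons, List.foldl_nil]
    simp only [List.length_append, List.length_cons, List.length_nil, zero_add] at hlen
    have hqk : ((q : Int)) * K = ((k * q : Nat) : Int) := by rw [hKk]; push_cast; ring
    by_cases hr1 : 1 ≤ r
    · -- a vowel strictly inside a group (position r of it, 1 ≤ r < k)
      have hlen' : l.length = k * q + (r - 1) := by omega
      rw [ih q (r - 1) hlen' (by omega)]
      have hc : (((r - 1 : Nat) : Int) + 1 == K) = false := by
        simp only [beq_eq_false_iff_ne, ne_eq, hKk]; omega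
      simp only [pvVowelStep, hc, Bool.false_eq_true, if_false]
      simp only [Prod.mk.injEq]
      refine ⟨?_, by simp, by omega, ?_, by simp; omega⟩
      · -- the product component
        by_cases hq1 : 1 ≤ q
        · by_cases hr2 : 2 ≤ r
          · -- no group boundary involved
            have hp : decide (1 ≤ q ∧ r - 1 = 0) = false := by simp; omega
            have hb : ((q : Int) + 1 - 1) * K ≤ (l.length : Int) - 1 := by
              rw [add_sub_cancel_right, hqk]; omega
            simp only [hp, Bool.false_eq_true, if_false, show (1:Nat) ≤ r - 1 ↔ True by simp; omega,
              if_true, iff_true, hr1, if_pos]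
            rw [pvAprod_append K hK1 l x ((q : Int) + 1) hb]
          · -- r = 1: first vowel after a completed group: multiply in the gap
            have hreq : r = 1 := by omega
            subst hreq
            have hp : decide (1 ≤ q ∧ 1 - 1 = 0) = true := by simp; omega
            simp only [hp, if_true, Nat.sub_self, Nat.cast_zero, zero_add,
              show ¬ ((1:Nat) ≤ 0) by omega, if_false, if_pos (le_refl (1:Nat)), hq1, if_pos]
            rw [if_pos (by decide)]
            rw [pvAprod_mul K hK1 l x (q : Int) (by exact_mod_cast hq1) (by rw [hqk]; omega)]
        · -- q = 0: no complete group yet, product still 1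
          have hq0 : q = 0 := by omega
          subst hq0
          have hp : decide ((1:Nat) ≤ 0 ∧ r - 1 = 0) = false := by simp
          simp only [hp, Bool.false_eq_true, if_false, Nat.cast_zero, if_pos hr1]
          by_cases hr2 : 1 ≤ r - 1
          · simp only [if_pos hr2, zero_add]
            rw [pvAprod_append K hK1 l x 1 (by simp; omega)]
          · simp only [if_neg hr2, zero_add]
            rw [pvAprod, pvAprod, PySem.List.pyRange_one_eq_nil (by norm_num),
              PySem.List.pyRange_one_eq_nil (by norm_num)]
            rfl
      · -- the `last` component: unchanged, and still readable in l ++ [x]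
        by_cases hq1 : 1 ≤ q
        · have hkq1 : 0 < k * q := Nat.mul_pos (by omega) (by omega)
          simp only [if_pos hq1]
          rw [pvGetD_append_left l x _ 0 (by rw [hqk]; omega) (by rw [hqk]; omega)]
        · simp only [if_neg hq1]
    · -- r = 0: this vowel completes a group
      have hr0 : r = 0 := by omega
      subst hr0
      have hq1 : 1 ≤ q := by
        rcases Nat.eq_zero_or_pos q with h | h
        · subst h; simp at hlen
        · omega
      have e1 : k * (q - 1) = k * q - k := by
        rw [Nat.mul_sub, Nat.mul_one]
      have e2 : k ≤ k * q := Nat.le_mul_of_pos_right k (by omega)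
      have hlen' : l.length = k * (q - 1) + (k - 1) := by omega
      rw [ih (q - 1) (k - 1) hlen' (by omega)]
      have hc : (((k - 1 : Nat) : Int) + 1 == K) = true := by
        simp only [beq_iff_eq, hKk]; omega
      simp only [pvVowelStep, hc, if_true]
      have hq1k : ((q - 1 : Nat) : Int) = (q : Int) - 1 := by omega
      have hq1K : ((q : Int) - 1) * K = ((k * (q - 1) : Nat) : Int) := by
        rw [hKk]; push_cast [hq1]; ring
      simp only [Prod.mk.injEq]
      refine ⟨?_, by simp, by norm_num, ?_, by simp; omega⟩
      · -- the product component
        by_cases hk2 : 2 ≤ k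
        · -- the group completer is not a group starter: no multiplication
          have hp : decide (1 ≤ q - 1 ∧ k - 1 = 0) = false := by simp; omega
          simp only [hp, Bool.false_eq_true, if_false, show (1:Nat) ≤ k - 1 ↔ True by simp; omega,
            iff_true, if_true, show ¬ ((1:Nat) ≤ 0) by omega, if_false]
          rw [show ((q - 1 : Nat) : Int) + 1 = (q : Int) by omega]
          rw [pvAprod_append K hK1 l x (q : Int) (by rw [hq1K]; omega)]
        · -- K = 1: every vowel both completes and starts a group
          have hkeq : k = 1 := by omega
          by_cases hq2 : 2 ≤ q
          · have hp : decide (1 ≤ q - 1 ∧ k - 1 = 0) = true := by simp; omega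
            simp only [hp, if_true, show ¬ ((1:Nat) ≤ k - 1) by omega, if_false,
              show ¬ ((1:Nat) ≤ 0) by omega, show (1:Nat) ≤ q - 1 by omega, if_pos]
            have hm1 : (1:Int) ≤ (q : Int) - 1 := by omega
            have hml : (l.length : Int) = ((q : Int) - 1) * K := by rw [hq1K]; omega
            have := pvAprod_mul K hK1 l x ((q : Int) - 1) hm1 hml
            rw [show (q : Int) - 1 + 1 = (q : Int) by ring] at this
            simp only [hkeq]
            rw [this, if_pos (by decide), hq1k]
          · -- q = 1: very first group, no gap to multiply
            have hqeq : q = 1 := by omega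
            subst hqeq
            have hp : decide ((1:Nat) ≤ 1 - 1 ∧ k - 1 = 0) = false := by simp
            simp only [hp, Bool.false_eq_true, if_false, show ¬ ((1:Nat) ≤ k - 1) by omega,
              if_false, Nat.sub_self, Nat.cast_zero, Nat.cast_one]
            rw [pvAprod, pvAprod, PySem.List.pyRange_one_eq_nil (by norm_num),
              PySem.List.pyRange_one_eq_nil (by norm_num)]
            rfl
      · -- the `last` component: the new vowel itself
        simp only [if_pos hq1]
        rw [show (q : Int) * K - 1 = (l.length : Int) by rw [hqk]; omega, pvGetD_append_length]

-- the invariant of B's scan for K ≤ -1: nothing ever fires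
lemma pvFold_neg (K : Int) (hK : K ≤ -1) (l : List Int) :
    ∀ t : Int, 0 ≤ t →
    l.foldl (pvVowelStep K) (1, t, t, 0, false) = (1, t + l.length, t + l.length, 0, false) := by
  induction l with
  | nil => intro t ht; simp
  | cons i l ih =>
    intro t ht
    have hstep : pvVowelStep K (1, t, t, 0, false) i = (1, t + 1, t + 1, 0, false) := by
      unfold pvVowelStep
      have : ((t + 1 == K) = false) := by simp; omega
      simp [this]
    rw [List.foldl_cons, hstep]
    have := ih (t + 1) (by omega)
    rw [this, List.length_cons]
    have h2 : t + 1 + ((l.length : Nat) : Int) = t + (((l.length + 1 : Nat) : Nat) : Int) := by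
      push_cast; ring
    rw [h2]

-- ===== VERDICT (by name: the statement is the Claim_ definition above) =====
theorem count_vowel_matrix_slices_spec : Claim_equal_count_vowel_matrix_slices := by
  intro N K S _ hPre
  obtain ⟨hK0, -⟩ := hPre
  unfold Spec_count_vowel_matrix_slices count_vowel_matrix_slices count_vowel_matrix_slices_alt
  rw [PySem.List.foldl_if_eq_foldl_filter (fun i => pvIsVowelAt S i) (pvVowelStep K)]
  set l := (PySem.List.pyRange 0 N 1).filter (fun i => pvIsVowelAt S i) with hl
  rcases lt_or_gt_of_ne hK0 with hKneg | hKpos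
  · -- K ≤ -1
    rw [pvFold_neg K (by omega) l 0 le_rfl]
    simp only [zero_add]
    by_cases hdvd : PySem.Int.mod (l.length : Int) K = 0
    · rw [if_neg (not_not_intro hdvd), if_neg (not_not_intro hdvd)]
      have hfl : PySem.Int.floordiv (l.length : Int) K ≤ 1 := by
        by_contra hgt
        rw [not_le] at hgt
        have hmul := PySem.Int.floordiv_mul_add_mod (l.length : Int) K
        rcases (PySem.Int.mod_eq_zero_iff_dvd _ _).mp hdvd with ⟨c, hc⟩
        have : PySem.Int.floordiv (l.length : Int) K * K ≤ 2 * K := by nlinarith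
        have hlen0 : (0 : Int) ≤ (l.length : Int) := by positivity
        nlinarith [hmul, hdvd]
      rw [PySem.List.pyRange_one_eq_nil hfl]
      rfl
    · rw [if_pos hdvd, if_pos hdvd]
  · -- K ≥ 1
    have hKk : K = (K.toNat : Int) := (Int.toNat_of_nonneg (by omega)).symm
    set k := K.toNat with hkdef
    have hk : 1 ≤ k := by omega
    rw [pvFold_pos K k hKk hk l (l.length / k) (l.length % k)
        (Nat.div_add_mod l.length k).symm (Nat.mod_lt _ (by omega))]
    simp only []
    by_cases hdvd : PySem.Int.mod (l.length : Int) K = 0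
    · rw [if_neg (not_not_intro hdvd), if_neg (not_not_intro hdvd)]
      have hr : l.length % k = 0 := by
        rw [hKk, PySem.Int.mod_natCast] at hdvd
        exact_mod_cast hdvd
      rw [hr]
      have hfl : PySem.Int.floordiv (l.length : Int) K = ((l.length / k : Nat) : Int) := by
        rw [hKk, PySem.Int.floordiv_natCast]
      rw [hfl]
      simp only [show ¬ (1 ≤ (0:Nat)) from by omega, if_false]
      rfl
    · rw [if_pos hdvd, if_pos hdvd]
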